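-- pv_equiv track=rewrite | github.com/mohit9878s/State-Dashboard | main_number_format.py | format_comma_number
-- ===== SOURCE A (Python) =====
-- def format_comma_number(n):
--     s = str(int(n))
--     if len(s) <= 3:
--         return s
--     last_three = s[-3:]
--     rest = s[:-3]
--     parts = []
--     while len(rest) > 2:
--         parts.insert(0, rest[-2:])
--         rest = rest[:-2]
--     if rest:
--         parts.insert(0, rest)
--     return ",".join(parts) + "," + last_three
-- ===== SOURCE B (Python) =====
-- def format_comma_number(n):
--     out = ""
--     for i, c in enumerate(reversed(str(int(n)))):
--         if i >= 3 and i % 2 == 1: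
--             out = "," + out
--         out = c + out
--     return out
-- ===== Notes on version B (the rewrite author's own statement) =====
-- stated objective: simpler
-- what changed: Replaces the slice-off-last-three plus right-peeling while loop building a parts list with a single right-to-left pass that prepends a comma whenever the right-distance index i satisfies i >= 3 and i % 2 == 1.
import Mathlib
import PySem

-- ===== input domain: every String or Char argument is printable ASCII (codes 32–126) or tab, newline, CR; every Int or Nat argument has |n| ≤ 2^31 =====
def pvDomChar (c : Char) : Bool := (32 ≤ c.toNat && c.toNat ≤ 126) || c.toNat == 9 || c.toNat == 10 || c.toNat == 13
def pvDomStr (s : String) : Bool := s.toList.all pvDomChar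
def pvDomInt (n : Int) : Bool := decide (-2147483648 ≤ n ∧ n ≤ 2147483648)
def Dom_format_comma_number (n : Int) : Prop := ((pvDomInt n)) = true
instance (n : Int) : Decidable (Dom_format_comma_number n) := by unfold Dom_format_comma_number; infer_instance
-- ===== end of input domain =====

-- B builds the string in one right-to-left pass with a comma-position predicate instead of
-- A's slice-off-last-three plus right-peeling while loop over a parts list; return values agree everywhere.

-- ===== PORT A =====
-- the while loop: while len(rest) > 2: parts.insert(0, rest[-2:]); rest = rest[:-2]
def fcnLoop (rest : List Char) (parts : List (List Char)) : List Char × List (List Char) :=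
  if h : 2 < rest.length then
    fcnLoop (PySem.List.slice rest none (some (-2)))
            (PySem.List.slice rest (some (-2)) none :: parts)
  else (rest, parts)
termination_by rest.length
decreasing_by
  rw [PySem.List.slice_to_neg_ofNat rest 2 (by omega)]
  simp [List.length_take]; omega

def format_comma_number (n : Int) : String :=
  let s := PySem.Int.toChars n
  if s.length ≤ 3 then String.ofList s
  else
    let last_three := PySem.List.slice s (some (-3)) none
    let rest := PySem.List.slice s none (some (-3))
    let rp := fcnLoop rest []
    let parts := if rp.1 ≠ [] then rp.1 :: rp.2 else rp.2
    String.ofList (PySem.Chars.join [','] parts ++ [','] ++ last_three)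

-- ===== PORT B =====
def format_comma_number_alt (n : Int) : String :=
  let s := PySem.Int.toChars n
  String.ofList ((PySem.List.enumerate s.reverse 0).foldl
    (fun out ic =>
      ic.2 :: (if 3 ≤ ic.1 ∧ PySem.Int.mod ic.1 2 = 1 then ',' :: out else out)) [])

-- ===== PRECONDITION & SPEC =====
def Spec_format_comma_number (n : Int) (out : String) : Prop := out = format_comma_number_alt n
instance (n : Int) (out : String) : Decidable (Spec_format_comma_number n out) := by unfold Spec_format_comma_number; infer_instance

-- ===== CLAIM (what is proved, stated in full; the proofs are below) =====
def Claim_equal_format_comma_number : Prop := ∀ (n : Int), Dom_format_comma_number n → Spec_format_comma_number n (format_comma_number n)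

-- ===== LEMMAS AND PROOFS =====

-- character-level versions of the two bodies
def achars (s : List Char) : List Char :=
  if s.length ≤ 3 then s
  else
    let last_three := PySem.List.slice s (some (-3)) none
    let rest := PySem.List.slice s none (some (-3))
    let rp := fcnLoop rest []
    let parts := if rp.1 ≠ [] then rp.1 :: rp.2 else rp.2
    PySem.Chars.join [','] parts ++ [','] ++ last_three

def bchars (s : List Char) : List Char :=
  (PySem.List.enumerate s.reverse 0).foldl
    (fun out ic =>
      ic.2 :: (if 3 ≤ ic.1 ∧ PySem.Int.mod ic.1 2 = 1 then ',' :: out else out)) []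

theorem format_comma_number_eq_achars (n : Int) :
    format_comma_number n = String.ofList (achars (PySem.Int.toChars n)) := by
  simp only [format_comma_number, achars]
  split <;> rfl

theorem format_comma_number_alt_eq_bchars (n : Int) :
    format_comma_number_alt n = String.ofList (bchars (PySem.Int.toChars n)) := by
  rfl

-- the parts list built by the loop (leading remainder included), and its comma-join
def Pfun (r : List Char) : List (List Char) :=
  let rp := fcnLoop r []
  if rp.1 ≠ [] then rp.1 :: rp.2 else rp.2

def joinP (r : List Char) : List Char := PySem.Chars.join [','] (Pfun r)

theorem fcnLoop_le (rest parts) (h : rest.length ≤ 2) :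
    fcnLoop rest parts = (rest, parts) := by
  conv_lhs => rw [fcnLoop]
  rw [dif_neg (by omega)]

theorem fcnLoop_gt (rest parts) (h : 2 < rest.length) :
    fcnLoop rest parts
      = fcnLoop (rest.take (rest.length - 2)) (rest.drop (rest.length - 2) :: parts) := by
  conv_lhs => rw [fcnLoop]
  rw [dif_pos h, PySem.List.slice_to_neg_ofNat rest 2 (by omega),
      PySem.List.slice_from_neg_ofNat rest 2 (by omega)]

-- accumulator lemma for the loop
theorem fcnLoop_acc (r : List Char) : ∀ parts,
    fcnLoop r parts = ((fcnLoop r []).1, (fcnLoop r []).2 ++ parts) := by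
  induction hn : r.length using Nat.strong_induction_on generalizing r with
  | _ m ih =>
    intro parts
    by_cases h : 2 < r.length
    · have hlt : (r.take (r.length - 2)).length < m := by
        simp [List.length_take]; omega
      rw [fcnLoop_gt r parts h, fcnLoop_gt r [] h,
        ih (r.take (r.length - 2)).length hlt _ rfl (r.drop (r.length - 2) :: parts),
        ih (r.take (r.length - 2)).length hlt _ rfl [r.drop (r.length - 2)]]
      simp
    · rw [fcnLoop_le r parts (by omega), fcnLoop_le r [] (by omega)]; simp

-- the loop never empties a nonempty rest
theorem fcnLoop_fst_ne_nil : ∀ m (x : List Char), x.length = m → x ≠ [] →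
    (fcnLoop x []).1 ≠ [] := by
  intro m
  induction m using Nat.strong_induction_on with
  | _ m ih =>
    intro x hm hne
    by_cases hc : 2 < x.length
    · have hl : (x.take (x.length - 2)).length = x.length - 2 := by simp
      rw [fcnLoop_gt x [] hc, fcnLoop_acc]
      have := ih (x.take (x.length - 2)).length (by omega) (x.take (x.length - 2)) rfl
        (by intro hz; rw [hz] at hl; simp at hl; omega)
      simpa using this
    · rw [fcnLoop_le x [] (by omega)]; simpa using hne

theorem Pfun_step (r : List Char) (h : 2 < r.length) :
    Pfun r = Pfun (r.take (r.length - 2)) ++ [r.drop (r.length - 2)] := by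
  have ht : (r.take (r.length - 2)).length = r.length - 2 := by
    simp [List.length_take]
  have hne := fcnLoop_fst_ne_nil (r.take (r.length - 2)).length (r.take (r.length - 2)) rfl
    (by intro hz; rw [hz] at ht; simp at ht; omega)
  simp only [Pfun]
  rw [fcnLoop_gt r [] h, fcnLoop_acc (r.take (r.length - 2)) [r.drop (r.length - 2)]]
  rw [if_pos hne, if_pos hne]
  simp only [List.cons_append]

theorem Pfun_small (r : List Char) (h1 : r ≠ []) (h2 : r.length ≤ 2) : Pfun r = [r] := by
  simp [Pfun, fcnLoop_le r [] h2, h1]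

theorem Pfun_nil : Pfun [] = [] := by
  simp [Pfun, fcnLoop_le [] [] (by simp)]

-- join over an appended chunk
theorem joinP_append (xs : List (List Char)) (y : List Char) (h : xs ≠ []) :
    PySem.Chars.join [','] (xs ++ [y]) = PySem.Chars.join [','] xs ++ ',' :: y := by
  induction xs with
  | nil => simp at h
  | cons a t ih =>
    cases t with
    | nil =>
      rw [List.cons_append, List.nil_append, PySem.Chars.join_cons_cons,
        PySem.Chars.join_singleton, PySem.Chars.join_singleton]
      simp
    | cons b u =>
      have hih := ih (by simp)
      simp only [List.cons_append] at hih ⊢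
      rw [PySem.Chars.join_cons_cons, hih, PySem.Chars.join_cons_cons]
      simp

-- front-peeling recursion for joinP
theorem joinP_cons : ∀ m (r : List Char), r.length = m → ∀ c,
    joinP (c :: r) = c :: (if r ≠ [] ∧ r.length % 2 = 0 then ',' :: joinP r else joinP r) := by
  intro m
  induction m using Nat.strong_induction_on with
  | _ m ih =>
    intro r hm c
    match r with
    | [] =>
      rw [joinP, Pfun_small [c] (by simp) (by simp), PySem.Chars.join_singleton]
      simp [joinP, Pfun_nil, PySem.Chars.join_nil]
    | [d] =>
      rw [joinP, Pfun_small [c, d] (by simp) (by simp), PySem.Chars.join_singleton]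
      simp [joinP, Pfun_small [d] (by simp) (by simp), PySem.Chars.join_singleton]
    | [d, e] =>
      have hstep := Pfun_step [c, d, e] (by simp)
      norm_num at hstep
      rw [joinP, hstep, Pfun_small [c] (by simp) (by simp),
        joinP_append [[c]] [d, e] (by simp), PySem.Chars.join_singleton]
      simp [joinP, Pfun_small [d, e] (by simp) (by simp), PySem.Chars.join_singleton]
    | d :: e :: f :: u =>
      have htk : (c :: d :: e :: f :: u).take ((c :: d :: e :: f :: u).length - 2)
          = c :: (d :: e :: f :: u).take ((d :: e :: f :: u).length - 2) := by
        simp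
      have hdp : (c :: d :: e :: f :: u).drop ((c :: d :: e :: f :: u).length - 2)
          = (d :: e :: f :: u).drop ((d :: e :: f :: u).length - 2) := by
        simp
      have hr := Pfun_step (c :: d :: e :: f :: u) (by simp)
      rw [htk, hdp] at hr
      set r := d :: e :: f :: u with hrdef
      set t := r.take (r.length - 2) with htdef
      have hlr : 2 < r.length := by rw [hrdef]; simp
      have htl : t.length = r.length - 2 := by
        rw [htdef]; simp [List.length_take]
      have htne : t ≠ [] := by
        intro hz; rw [hz] at htl; rw [hrdef] at htl; simp at htl
      have ihct := ih t.length (by omega) t rfl c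
      have h1 : joinP (c :: r) = joinP (c :: t) ++ ',' :: r.drop (r.length - 2) := by
        have hne : Pfun (c :: t) ≠ [] := by
          by_cases hc2 : 2 < (c :: t).length
          · rw [Pfun_step _ hc2]; simp
          · rw [Pfun_small _ (by simp) (by simp at hc2 ⊢; omega)]; simp
        simp only [joinP, hr]
        exact joinP_append _ _ hne
      have h2 : joinP r = joinP t ++ ',' :: r.drop (r.length - 2) := by
        have hne : Pfun t ≠ [] := by
          by_cases hc2 : 2 < t.length
          · rw [Pfun_step _ hc2]; simp
          · rw [Pfun_small _ htne (by omega)]; simp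
        simp only [joinP, Pfun_step r hlr, ← htdef]
        exact joinP_append _ _ hne
      rw [h1, ihct, h2]
      have hpar : t.length % 2 = r.length % 2 := by
        rw [htl, hrdef]; simp; omega
      by_cases hev : r.length % 2 = 0
      · rw [if_pos ⟨htne, by omega⟩, if_pos ⟨by rw [hrdef]; simp, hev⟩]; simp
      · rw [if_neg (by rintro ⟨-, h0⟩; omega), if_neg (by rintro ⟨-, h0⟩; omega)]; simp

theorem achars_small (s : List Char) (h : s.length ≤ 3) : achars s = s := by
  simp [achars, h]

-- front-peeling recursion for achars (tails of length ≥ 3)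
theorem achars_cons (c : Char) (t : List Char) (h : 3 ≤ t.length) :
    achars (c :: t)
      = c :: (if t.length % 2 = 1 then ',' :: achars t else achars t) := by
  have e1 : (c :: t).length - 3 = (t.length - 3) + 1 := by simp; omega
  have hlast : PySem.List.slice (c :: t) (some (-3)) none = t.drop (t.length - 3) := by
    rw [PySem.List.slice_from_neg_ofNat (c :: t) 3 (by omega), e1, List.drop_succ_cons]
  have hrest : PySem.List.slice (c :: t) none (some (-3))
      = c :: t.take (t.length - 3) := by
    rw [PySem.List.slice_to_neg_ofNat (c :: t) 3 (by omega), e1, List.take_succ_cons]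
  have hA : achars (c :: t)
      = joinP (c :: t.take (t.length - 3)) ++ ',' :: t.drop (t.length - 3) := by
    simp only [achars]
    rw [if_neg (by simp; omega), hlast, hrest]
    simp [joinP, Pfun]
  rw [hA, joinP_cons (t.take (t.length - 3)).length _ rfl c]
  have htl : (t.take (t.length - 3)).length = t.length - 3 := by
    simp [List.length_take]
  by_cases h3 : t.length = 3
  · have ht0 : t.take (t.length - 3) = [] := by simp [h3]
    rw [ht0]
    simp only [ne_eq, not_true_eq_false, false_and, if_false]
    rw [achars_small t (by omega), h3]
    simp [joinP, Pfun_nil, PySem.Chars.join_nil]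
  · have h4 : 4 ≤ t.length := by omega
    have htne : t.take (t.length - 3) ≠ [] := by
      intro hz; rw [hz] at htl; simp at htl; omega
    have hB : achars t = joinP (t.take (t.length - 3)) ++ ',' :: t.drop (t.length - 3) := by
      have hlast' : PySem.List.slice t (some (-3)) none = t.drop (t.length - 3) := by
        rw [PySem.List.slice_from_neg_ofNat t 3 (by omega)]
      have hrest' : PySem.List.slice t none (some (-3)) = t.take (t.length - 3) := by
        rw [PySem.List.slice_to_neg_ofNat t 3 (by omega)]
      simp only [achars]
      rw [if_neg (by omega), hlast', hrest']
      simp [joinP, Pfun]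
    rw [hB]
    by_cases hev : t.length % 2 = 1
    · rw [if_pos ⟨htne, by omega⟩, if_pos hev]; simp
    · rw [if_neg (by rintro ⟨-, h0⟩; omega), if_neg hev]; simp

-- front-peeling recursion for bchars
theorem bchars_cons (c : Char) (t : List Char) :
    bchars (c :: t)
      = c :: (if 3 ≤ t.length ∧ t.length % 2 = 1 then ',' :: bchars t else bchars t) := by
  have hmod : PySem.Int.mod (t.length : Int) 2 = ((t.length % 2 : Nat) : Int) := by
    exact_mod_cast PySem.Int.mod_natCast t.length 2
  simp only [bchars, List.reverse_cons, PySem.List.enumerate_append, List.foldl_append,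
    PySem.List.enumerate_cons, PySem.List.enumerate_nil, List.foldl_cons, List.foldl_nil,
    List.length_reverse, Int.zero_add, hmod]
  by_cases hp : 3 ≤ t.length ∧ t.length % 2 = 1
  · have h1 : (3 : Int) ≤ (t.length : Int) := by exact_mod_cast hp.1
    have h2 : ((t.length % 2 : Nat) : Int) = 1 := by exact_mod_cast hp.2
    rw [if_pos ⟨h1, h2⟩, if_pos hp]
  · rw [if_neg (fun hx => hp ⟨by exact_mod_cast hx.1, by exact_mod_cast hx.2⟩), if_neg hp]

theorem bchars_small (s : List Char) (h : s.length ≤ 3) : bchars s = s := by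
  induction s with
  | nil => rfl
  | cons c t ih =>
    rw [bchars_cons, if_neg (by simp at h; omega), ih (by simp at h; omega)]

theorem achars_eq_bchars : ∀ m (s : List Char), s.length = m → achars s = bchars s := by
  intro m
  induction m using Nat.strong_induction_on with
  | _ m ih =>
    intro s hm
    by_cases h : s.length ≤ 3
    · rw [achars_small s h, bchars_small s h]
    · match s with
      | c :: t =>
        have h3 : 3 ≤ t.length := by simp at h; omega
        rw [achars_cons c t h3, bchars_cons c t,
          ih t.length (by subst hm; simp) t rfl]
        by_cases hp : t.length % 2 = 1 <;> simp [hp, h3]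

-- ===== VERDICT (by name: the statement is the Claim_ definition above) =====
theorem format_comma_number_spec : Claim_equal_format_comma_number := by
  intro n _
  show _ = _
  rw [format_comma_number_eq_achars, format_comma_number_alt_eq_bchars,
    achars_eq_bchars (PySem.Int.toChars n).length _ rfl]
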